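-- pv_equiv track=rewrite | github.com/fbv81bp/Counter_side_channel_attacks | masked_AND_by_me/and.py | masked_AND
-- ===== SOURCE A (Python) =====
-- def masked_AND(am, bm):
--     #calculate AND between masked values
--     cm = [am[i] & bm[i] for i in range(r)]
--     #calculating correction terms
--     for i in range(r):
--         suma = 0
--         sumb = 0
--         #calculating parities of all corresponding Aj and Bj bits...
--         for j in range(r):
--             #...corresponding means all but the Ai and Bi bits
--             if i==j:
--                 continue
--             #parities
--             suma ^= am[j]
--             sumb ^= bm[j]
--         #addig correction term to the particular output share
--         #which is the "AND" between the parities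
--         cm[i] ^= suma & sumb
--     return cm
--
-- r = 5 #6 #uncomment to test even number of shares
-- ===== SOURCE B (Python) =====
-- def masked_AND(am, bm):
--     # One pass computes the full parities; each share's "all but i" parity
--     # is then recovered by XOR-cancelling its own contribution.
--     totalA = 0
--     totalB = 0
--     for j in range(r):
--         totalA ^= am[j]
--         totalB ^= bm[j]
--     return [(am[i] & bm[i]) ^ ((totalA ^ am[i]) & (totalB ^ bm[i]))
--             for i in range(r)]
--
-- r = 5
-- ===== Notes on version B (the rewrite author's own statement) =====
-- stated objective: alternative
-- what changed: Replaces the nested exclude-one rescan (for each i, re-XOR all shares j != i) by one pass computing the total parities and an XOR self-cancellation per index, removing the inner loop and the in-place cm[i] ^= update; with r fixed at 5 this trades the quadratic-in-r rescan for a linear pass but is not measurably faster.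
import Mathlib
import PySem

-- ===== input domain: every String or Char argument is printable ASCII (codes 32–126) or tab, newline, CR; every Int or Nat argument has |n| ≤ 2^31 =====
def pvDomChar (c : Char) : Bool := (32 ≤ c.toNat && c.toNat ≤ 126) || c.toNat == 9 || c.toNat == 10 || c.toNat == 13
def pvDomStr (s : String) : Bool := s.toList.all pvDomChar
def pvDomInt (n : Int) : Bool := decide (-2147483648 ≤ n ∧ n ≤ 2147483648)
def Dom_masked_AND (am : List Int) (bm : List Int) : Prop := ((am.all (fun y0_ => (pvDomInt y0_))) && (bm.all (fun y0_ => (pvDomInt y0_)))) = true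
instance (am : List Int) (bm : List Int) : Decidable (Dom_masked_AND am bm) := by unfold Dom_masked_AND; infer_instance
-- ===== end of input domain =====

-- B computes the two total parities in one pass and derives each exclude-one parity by
-- XOR self-cancellation, removing A's nested i≠j rescan and in-place cm[i] update (objective: alternative).

-- the module constant: r = 5 shares
def pvR : Int := 5

-- ===== PORT A =====
-- pyGetD/pySetD are used where Pre_masked_AND guarantees the index is in range (0..4 < length).
def masked_AND (am : List Int) (bm : List Int) : List Int :=
  -- cm = [am[i] & bm[i] for i in range(r)]
  let cm := (PySem.List.pyRange 0 pvR 1).map (fun i =>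
    PySem.Int.band (PySem.List.pyGetD am i 0) (PySem.List.pyGetD bm i 0))
  -- for i in range(r): suma = 0; sumb = 0; for j in range(r): if i==j: continue; suma ^= am[j]; sumb ^= bm[j]
  --                    cm[i] ^= suma & sumb
  (PySem.List.pyRange 0 pvR 1).foldl (fun cm i =>
    let s := (PySem.List.pyRange 0 pvR 1).foldl (fun (s : Int × Int) j =>
      if i == j then s
      else (PySem.Int.bxor s.1 (PySem.List.pyGetD am j 0),
            PySem.Int.bxor s.2 (PySem.List.pyGetD bm j 0))) (0, 0)
    PySem.List.pySetD cm i
      (PySem.Int.bxor (PySem.List.pyGetD cm i 0) (PySem.Int.band s.1 s.2))) cm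

-- ===== PORT B =====
def masked_AND_alt (am : List Int) (bm : List Int) : List Int :=
  -- for j in range(r): totalA ^= am[j]; totalB ^= bm[j]
  let t := (PySem.List.pyRange 0 pvR 1).foldl (fun (t : Int × Int) j =>
    (PySem.Int.bxor t.1 (PySem.List.pyGetD am j 0),
     PySem.Int.bxor t.2 (PySem.List.pyGetD bm j 0))) (0, 0)
  -- [(am[i] & bm[i]) ^ ((totalA ^ am[i]) & (totalB ^ bm[i])) for i in range(r)]
  (PySem.List.pyRange 0 pvR 1).map (fun i =>
    PySem.Int.bxor
      (PySem.Int.band (PySem.List.pyGetD am i 0) (PySem.List.pyGetD bm i 0))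
      (PySem.Int.band (PySem.Int.bxor t.1 (PySem.List.pyGetD am i 0))
                      (PySem.Int.bxor t.2 (PySem.List.pyGetD bm i 0))))

-- ===== PRECONDITION & SPEC =====
-- A indexes am[i], bm[i] for i in 0..4 (r = 5): shorter lists raise IndexError.
def Pre_masked_AND (am : List Int) (bm : List Int) : Prop :=
  5 ≤ am.length ∧ 5 ≤ bm.length
instance (am : List Int) (bm : List Int) : Decidable (Pre_masked_AND am bm) := by
  unfold Pre_masked_AND; infer_instance
def pvWitness_masked_AND : List Int × List Int := ([3, -1, 7, 0, 12], [5, 2, -9, 1, 4])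

def Spec_masked_AND (am : List Int) (bm : List Int) (out : List Int) : Prop := out = masked_AND_alt am bm
instance (am : List Int) (bm : List Int) (out : List Int) : Decidable (Spec_masked_AND am bm out) := by unfold Spec_masked_AND; infer_instance

-- ===== CLAIM (what is proved, stated in full; the proofs are below) =====
def Claim_equal_masked_AND : Prop := ∀ (am : List Int) (bm : List Int), Dom_masked_AND am bm → Pre_masked_AND am bm → Spec_masked_AND am bm (masked_AND am bm)

-- ===== LEMMAS AND PROOFS =====

theorem pv_bxor_assoc (a b c : Int) :
    PySem.Int.bxor (PySem.Int.bxor a b) c = PySem.Int.bxor a (PySem.Int.bxor b c) := by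
  unfold PySem.Int.bxor
  by_cases ha : 0 ≤ a <;> by_cases hb : 0 ≤ b <;> by_cases hc : 0 ≤ c <;>
    simp [ha, hb, hc, Nat.xor_assoc] <;> omega

theorem pv_bxor_left_comm (a b c : Int) :
    PySem.Int.bxor a (PySem.Int.bxor b c) = PySem.Int.bxor b (PySem.Int.bxor a c) := by
  rw [← pv_bxor_assoc, PySem.Int.bxor_comm a b, pv_bxor_assoc]

theorem pv_bxor_zero_left (a : Int) : PySem.Int.bxor 0 a = a := by
  rw [PySem.Int.bxor_comm, PySem.Int.bxor_zero]

theorem pv_bxor_cancel (a b : Int) : PySem.Int.bxor a (PySem.Int.bxor a b) = b := by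
  rw [← pv_bxor_assoc, PySem.Int.bxor_self, pv_bxor_zero_left]

-- ===== VERDICT (by name: the statement is the Claim_ definition above) =====
set_option maxHeartbeats 2000000 in
theorem masked_AND_spec : Claim_equal_masked_AND := by
  intro am bm _ hpre
  unfold Spec_masked_AND
  rcases am with _ | ⟨a0, _ | ⟨a1, _ | ⟨a2, _ | ⟨a3, _ | ⟨a4, as⟩⟩⟩⟩⟩ <;>
    rcases bm with _ | ⟨b0, _ | ⟨b1, _ | ⟨b2, _ | ⟨b3, _ | ⟨b4, bs⟩⟩⟩⟩⟩ <;>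
      simp [Pre_masked_AND] at hpre
  simp only [masked_AND, masked_AND_alt, pvR,
    show PySem.List.pyRange 0 5 1 = [0, 1, 2, 3, 4] from by decide,
    List.map, List.foldl]
  simp [pysem]
  refine ⟨?_, ?_, ?_, ?_, ?_⟩ <;>
    simp [pv_bxor_left_comm, PySem.Int.bxor_comm, pv_bxor_cancel,
      PySem.Int.bxor_self, PySem.Int.bxor_zero]
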